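-- pv_equiv track=rewrite | github.com/Will-check/AI-voice-studio | nicegui_app/logic/tabs/audiobook_creation_logic.py | _split_text_preserving_words
-- ===== SOURCE A (Python) =====
-- from typing import Optional, List, Dict, Tuple
--
-- def _split_text_preserving_words(text: str, max_length: int) -> List[str]:
--     text = text.strip()
--     if len(text) <= max_length:
--         return [text]
--
--     chunks = []
--     while len(text) > max_length:
--         split_index = text[:max_length].rfind(" ")
--
--         if split_index == -1:
--             # Sanity check, probably impossible situation where we have 1 large word
--             # We're cutting hard on the limit
--             split_index = max_length
--
--         chunk = text[:split_index].strip()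
--         if chunk:
--             chunks.append(chunk)
--
--         text = text[split_index:].strip()
--
--     if text:
--         chunks.append(text)
--
--     return chunks
-- ===== SOURCE B (Python) =====
-- from typing import List
--
-- def _split_text_preserving_words(text: str, max_length: int) -> List[str]:
--     text = text.strip()
--     n = len(text)
--     if n <= max_length:
--         return [text]
--
--     chunks = []
--     i = 0
--     while n - i > max_length:
--         j = text.rfind(" ", i, i + max_length)
--         cut = i + max_length if j == -1 else j
--         chunk = text[i:cut].strip()
--         if chunk:
--             chunks.append(chunk)
--         i = cut
--         while i < n and text[i].isspace():
--             i += 1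
--
--     tail = text[i:]
--     if tail:
--         chunks.append(tail)
--     return chunks
-- ===== Notes on version B (the rewrite author's own statement) =====
-- stated objective: alternative
-- what changed: B replaces A's repeated re-slicing and re-stripping of the whole remaining text (text = text[split_index:].strip() each round) by a single start-pointer i advanced over the once-stripped text, using rfind with start/end bounds and an in-place whitespace skip, so no tail copy is made; it trades A's shrinking-string state for index arithmetic.
import Mathlib
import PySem

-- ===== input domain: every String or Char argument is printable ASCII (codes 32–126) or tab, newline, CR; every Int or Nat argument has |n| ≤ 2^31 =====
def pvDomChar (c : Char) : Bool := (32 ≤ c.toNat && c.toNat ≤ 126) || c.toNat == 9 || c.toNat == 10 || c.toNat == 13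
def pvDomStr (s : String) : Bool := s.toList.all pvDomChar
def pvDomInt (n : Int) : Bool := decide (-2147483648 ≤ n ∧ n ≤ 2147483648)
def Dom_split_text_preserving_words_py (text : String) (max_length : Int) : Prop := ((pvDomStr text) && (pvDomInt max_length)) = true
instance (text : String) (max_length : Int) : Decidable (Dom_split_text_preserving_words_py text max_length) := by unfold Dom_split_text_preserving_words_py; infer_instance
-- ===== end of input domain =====

-- B replaces A's per-iteration tail copy (text = text[split_index:].strip()) by a single
-- start pointer advanced over the once-stripped text (objective: alternative).

-- ===== PORT A =====
-- A's while loop; the exit branch carries the trailing `if text: chunks.append(text)`.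
-- Fuel makes the recursion total; fuel = len(text)+1 suffices on every input Pre_ admits.
def pvLoopA : Nat → List Char → List (List Char) → Int → List (List Char)
  | 0, _, chunks, _ => chunks
  | fuel + 1, text, chunks, m =>
    if (text.length : Int) > m then
      let r := PySem.Chars.rfind (PySem.List.slice text none (some m)) [' ']
      let si : Int := if r = -1 then m else r
      let chunk := PySem.Chars.strip (PySem.List.slice text none (some si))
      let chunks' := if chunk ≠ [] then chunks ++ [chunk] else chunks
      pvLoopA fuel (PySem.Chars.strip (PySem.List.slice text (some si) none)) chunks' m
    else
      if text ≠ [] then chunks ++ [text] else chunks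

def split_text_preserving_words_py (text : String) (max_length : Int) : List String :=
  let t := PySem.Chars.strip text.toList
  if (t.length : Int) ≤ max_length then [String.ofList t]
  else (pvLoopA (t.length + 1) t [] max_length).map String.ofList

-- ===== PORT B =====
-- B's inner loop `while i < n and text[i].isspace(): i += 1`
def pvSkipWs (s : List Char) (i : Nat) : Nat :=
  if h : i < s.length then
    if PySem.Chars.isspace (s[i]'h) then pvSkipWs s (i + 1) else i
  else i
  termination_by s.length - i
  decreasing_by omega

-- B's main loop; fuel = len(text)+1 suffices on every input Pre_ admits
def pvLoopB : Nat → List Char → Nat → Int → List (List Char) → List (List Char)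
  | 0, _, _, _, chunks => chunks
  | fuel + 1, s, i, m, chunks =>
    if (s.length : Int) - (i : Int) > m then
      let j := PySem.Chars.rfindFrom s [' '] (i : Int) (some ((i : Int) + m))
      let cut : Int := if j = -1 then (i : Int) + m else j
      let chunk := PySem.Chars.strip (PySem.List.slice s (some (i : Int)) (some cut))
      let chunks' := if chunk ≠ [] then chunks ++ [chunk] else chunks
      pvLoopB fuel s (pvSkipWs s cut.toNat) m chunks'
    else
      let tail := PySem.List.slice s (some (i : Int)) none
      if tail ≠ [] then chunks ++ [tail] else chunks

def split_text_preserving_words_py_alt (text : String) (max_length : Int) : List String :=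
  let s := PySem.Chars.strip text.toList
  if (s.length : Int) ≤ max_length then [String.ofList s]
  else (pvLoopB (s.length + 1) s 0 max_length []).map String.ofList

-- ===== PRECONDITION & SPEC =====
-- Pre_ excludes exactly the inputs on which Python A never returns: with max_length ≤ 0 the
-- loop makes no progress once reached (A loops forever); only max_length ≥ 1, plus the trivial
-- empty-stripped-text max_length = 0 case (where A returns [''] before the loop), are admitted.
def Pre_split_text_preserving_words_py (text : String) (max_length : Int) : Prop :=
  1 ≤ max_length ∨ (PySem.Chars.strip text.toList = [] ∧ max_length = 0)
instance (text : String) (max_length : Int) : Decidable (Pre_split_text_preserving_words_py text max_length) := by unfold Pre_split_text_preserving_words_py; infer_instance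

def pvWitness_split_text_preserving_words_py : String × Int := ("hello world", 5)

def Spec_split_text_preserving_words_py (text : String) (max_length : Int) (out : List String) : Prop := out = split_text_preserving_words_py_alt text max_length
instance (text : String) (max_length : Int) (out : List String) : Decidable (Spec_split_text_preserving_words_py text max_length out) := by unfold Spec_split_text_preserving_words_py; infer_instance

-- ===== CLAIM (what is proved, stated in full; the proofs are below) =====
def Claim_equal_split_text_preserving_words_py : Prop := ∀ (text : String) (max_length : Int), Dom_split_text_preserving_words_py text max_length → Pre_split_text_preserving_words_py text max_length → Spec_split_text_preserving_words_py text max_length (split_text_preserving_words_py text max_length)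

-- ===== LEMMAS AND PROOFS =====

lemma pv_dropWhile_take (p : Char → Bool) (l : List Char) (h : l.dropWhile p = l) (m : Nat) :
    (l.take m).dropWhile p = l.take m := by
  cases l with
  | nil => simp
  | cons a l =>
    have hpa : p a = false := by
      by_contra hpa
      simp only [List.dropWhile_cons] at h
      rw [if_pos (by simpa using hpa)] at h
      have := congrArg List.length h
      simp at this
      have := List.length_dropWhile_le p l
      omega
    cases m with
    | zero => simp
    | succ m => simp [List.dropWhile_cons, hpa]

lemma pv_dropWhile_eq_drop (p : Char → Bool) (l : List Char) :
    l.dropWhile p = l.drop (l.takeWhile p).length := by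
  have h := List.drop_left (l₁ := l.takeWhile p) (l₂ := l.dropWhile p)
  rw [List.takeWhile_append_dropWhile] at h
  exact h.symm

lemma pv_rstrip_take (l : List Char) : ∃ t, PySem.Chars.rstrip l = l.take t := by
  refine ⟨l.length - ((l.reverse).takeWhile PySem.Chars.isspace).length, ?_⟩
  unfold PySem.Chars.rstrip
  rw [pv_dropWhile_eq_drop, List.reverse_drop, List.reverse_reverse, List.length_reverse]

lemma pv_rstrip_drop (s : List Char) (hs : PySem.Chars.rstrip s = s) (k : Nat) :
    PySem.Chars.rstrip (s.drop k) = s.drop k := by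
  unfold PySem.Chars.rstrip at hs ⊢
  have hs' : List.dropWhile PySem.Chars.isspace s.reverse = s.reverse := by
    have := congrArg List.reverse hs
    simpa using this
  rw [List.reverse_drop]
  rw [pv_dropWhile_take _ _ hs']
  rw [← List.reverse_drop]
  simp

lemma pv_lstrip_cons_space (a : Char) (l : List Char) (h : PySem.Chars.isspace a = true) :
    PySem.Chars.lstrip (a :: l) = PySem.Chars.lstrip l := by
  simp [PySem.Chars.lstrip, h]

lemma pv_lstrip_cons_nospace (a : Char) (l : List Char) (h : PySem.Chars.isspace a = false) :
    PySem.Chars.lstrip (a :: l) = a :: l := by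
  simp [PySem.Chars.lstrip, h]

lemma pv_lstrip_lstrip (l : List Char) :
    PySem.Chars.lstrip (PySem.Chars.lstrip l) = PySem.Chars.lstrip l := by
  unfold PySem.Chars.lstrip
  induction l with
  | nil => simp
  | cons a l ih =>
    by_cases h : PySem.Chars.isspace a
    · simpa [List.dropWhile_cons, h] using ih
    · simp [h]

lemma pv_rstrip_rstrip (l : List Char) :
    PySem.Chars.rstrip (PySem.Chars.rstrip l) = PySem.Chars.rstrip l := by
  unfold PySem.Chars.rstrip
  rw [List.reverse_reverse]
  have := pv_lstrip_lstrip l.reverse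
  unfold PySem.Chars.lstrip at this
  rw [this]

lemma pv_lstrip_rstrip (l : List Char) (h : PySem.Chars.lstrip l = l) :
    PySem.Chars.lstrip (PySem.Chars.rstrip l) = PySem.Chars.rstrip l := by
  obtain ⟨t, ht⟩ := pv_rstrip_take l
  rw [ht]
  unfold PySem.Chars.lstrip at h ⊢
  exact pv_dropWhile_take _ _ h _

lemma pv_rfind_go_bounds (s sub : List Char) :
    ∀ k : Nat, PySem.Chars.rfind.go s sub k = -1 ∨
      (0 ≤ PySem.Chars.rfind.go s sub k ∧ PySem.Chars.rfind.go s sub k ≤ (k : Int)) := by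
  intro k
  induction k with
  | zero =>
    unfold PySem.Chars.rfind.go
    split <;> simp
  | succ k ih =>
    unfold PySem.Chars.rfind.go
    split
    · right; constructor <;> (push_cast; omega)
    · rcases ih with h | h
      · left; exact h
      · right; push_cast; omega

lemma pv_rfind_bounds (s sub : List Char) :
    PySem.Chars.rfind s sub = -1 ∨
      (0 ≤ PySem.Chars.rfind s sub ∧ PySem.Chars.rfind s sub ≤ (s.length : Int)) :=
  pv_rfind_go_bounds s sub s.length

lemma pv_skipWs_spec (s : List Char) : ∀ i : Nat, i ≤ s.length →
    pvSkipWs s i ≤ s.length ∧ s.drop (pvSkipWs s i) = PySem.Chars.lstrip (s.drop i) := by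
  intro i
  induction i using pvSkipWs.induct s with
  | case1 i h hsp ih =>
    intro hi
    rw [pvSkipWs, dif_pos h, if_pos hsp]
    obtain ⟨ha, hb⟩ := ih (by omega)
    refine ⟨ha, ?_⟩
    rw [hb, List.drop_eq_getElem_cons h, pv_lstrip_cons_space _ _ hsp]
  | case2 i h hsp =>
    intro hi
    rw [pvSkipWs, dif_pos h, if_neg hsp]
    refine ⟨hi, ?_⟩
    rw [List.drop_eq_getElem_cons h, pv_lstrip_cons_nospace _ _ (by simpa using hsp),
      ← List.drop_eq_getElem_cons h]
  | case3 i h =>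
    intro hi
    rw [pvSkipWs, dif_neg h]
    refine ⟨hi, ?_⟩
    rw [List.drop_eq_nil_of_le (by omega)]
    simp [PySem.Chars.lstrip]

lemma pv_rfindFrom_window (s sub : List Char) (i : Nat) (m : Int) (hm : 0 ≤ m)
    (hle : (i : Int) + m ≤ (s.length : Int)) :
    PySem.Chars.rfindFrom s sub (i : Int) (some ((i : Int) + m)) =
      (if PySem.Chars.rfind ((s.drop i).take m.toNat) sub = -1 then -1
       else (i : Int) + PySem.Chars.rfind ((s.drop i).take m.toNat) sub) := by
  unfold PySem.Chars.rfindFrom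
  have h1 : ¬ ((s.length : Int) < (i : Int) + m) := by omega
  have h2 : ¬ ((i : Int) + m < 0) := by omega
  have h3 : ¬ ((i : Int) < 0) := by omega
  have h4 : ¬ ((i : Int) + m < (i : Int)) := by omega
  simp only [h1, if_false, h2, h3, h4, Int.toNat_natCast]
  have htn : ((i : Int) + m).toNat = i + m.toNat := by omega
  rw [htn, List.drop_take]
  have : i + m.toNat - i = m.toNat := by omega
  rw [this]

lemma pv_loop_eq (s : List Char) (hs : PySem.Chars.rstrip s = s) (m : Int) (hm : 1 ≤ m) :
    ∀ (fuel : Nat) (i : Nat) (chunks : List (List Char)), i ≤ s.length →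
      PySem.Chars.lstrip (s.drop i) = s.drop i →
      pvLoopA fuel (s.drop i) chunks m = pvLoopB fuel s i m chunks := by
  intro fuel
  induction fuel with
  | zero => intro i chunks _ _; rfl
  | succ fuel ih =>
    intro i chunks hi hl
    have hlen : ((s.drop i).length : Int) = (s.length : Int) - (i : Int) := by
      rw [List.length_drop]; omega
    by_cases hc : ((s.drop i).length : Int) > m
    · have hcB : (s.length : Int) - (i : Int) > m := by omega
      have him : (i : Int) + m < (s.length : Int) := by omega
      simp only [pvLoopA, pvLoopB, if_pos hc, if_pos hcB]
      rw [PySem.List.slice_to _ (by omega : (0:Int) ≤ m)]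
      have hwin := pv_rfindFrom_window s [' '] i m (by omega) (by omega)
      rw [hwin]
      set r := PySem.Chars.rfind ((s.drop i).take m.toNat) [' '] with hr
      have hrb := pv_rfind_bounds ((s.drop i).take m.toNat) [' ']
      rw [← hr] at hrb
      set si : Int := if r = -1 then m else r with hsi
      have hsi0 : 0 ≤ si := by
        rw [hsi]; split_ifs with he
        · omega
        · rcases hrb with h | h
          · exact absurd h he
          · exact h.1
      have hsim : si ≤ m := by
        rw [hsi]; split_ifs with he
        · omega
        · rcases hrb with h | h
          · exact absurd h he
          · have h2 := h.2
            have hlt : (((s.drop i).take m.toNat).length : Int) ≤ m := by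
              rw [List.length_take, List.length_drop]
              omega
            omega
      have hcut : (if (if r = -1 then -1 else (i : Int) + r) = -1 then (i : Int) + m
          else (if r = -1 then -1 else (i : Int) + r)) = (i : Int) + si := by
        rcases eq_or_ne r (-1) with he | he
        · rw [hsi, if_pos he, if_pos he, if_pos rfl]
        · have hr0 : 0 ≤ r := by
            rcases hrb with h | h
            · exact absurd h he
            · exact h.1
          rw [hsi, if_neg he, if_neg he, if_neg (by omega)]
      rw [hcut]
      set k := si.toNat with hk
      have hsik : si = (k : Int) := by omega
      have hkm : k ≤ m.toNat := by omega
      have hchA : PySem.List.slice (s.drop i) none (some si) = (s.drop i).take k := by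
        rw [PySem.List.slice_to _ hsi0]
      have hchB : PySem.List.slice s (some (i : Int)) (some ((i : Int) + si)) = (s.drop i).take k := by
        have hE : (i : Int) + si = ((i + k : Nat) : Int) := by push_cast; omega
        rw [hE, PySem.List.slice_natCast]
        congr 1
        omega
      rw [hchA, hchB]
      have hcutN : ((i : Int) + si).toNat = i + k := by omega
      rw [hcutN]
      have hik : i + k ≤ s.length := by omega
      obtain ⟨hskle, hskdrop⟩ := pv_skipWs_spec s (i + k) hik
      have hnextA : PySem.Chars.strip (PySem.List.slice (s.drop i) (some si) none)
          = s.drop (pvSkipWs s (i + k)) := by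
        rw [PySem.List.slice_from _ hsi0, ← hk, List.drop_drop]
        unfold PySem.Chars.strip
        rw [← hskdrop]
        exact pv_rstrip_drop s hs _
      rw [hnextA]
      apply ih _ _ hskle
      rw [hskdrop]
      exact pv_lstrip_lstrip _
    · have hcB : ¬ ((s.length : Int) - (i : Int) > m) := by omega
      simp only [pvLoopA, pvLoopB, if_neg hc, if_neg hcB]
      rw [PySem.List.slice_from _ (by positivity : (0:Int) ≤ (i : Int)), Int.toNat_natCast]

theorem pv_top_eq (text : String) (max_length : Int)
    (hpre : Pre_split_text_preserving_words_py text max_length) :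
    split_text_preserving_words_py text max_length = split_text_preserving_words_py_alt text max_length := by
  unfold split_text_preserving_words_py split_text_preserving_words_py_alt
  set t := PySem.Chars.strip text.toList with ht
  by_cases h : (t.length : Int) ≤ max_length
  · rw [if_pos h, if_pos h]
  · rw [if_neg h, if_neg h]
    have hm : 1 ≤ max_length := by
      rcases hpre with h1 | ⟨h1, h2⟩
      · exact h1
      · exfalso; rw [← ht] at h1; rw [h1] at h; simp at h; omega
    have hlst : PySem.Chars.lstrip (PySem.Chars.lstrip text.toList) = PySem.Chars.lstrip text.toList :=
      pv_lstrip_lstrip _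
    have hs : PySem.Chars.rstrip t = t := by
      rw [ht]; unfold PySem.Chars.strip; exact pv_rstrip_rstrip _
    have hinv : PySem.Chars.lstrip (t.drop 0) = t.drop 0 := by
      rw [List.drop_zero, ht]
      unfold PySem.Chars.strip
      exact pv_lstrip_rstrip _ hlst
    have := pv_loop_eq t hs max_length hm (t.length + 1) 0 [] (by omega) hinv
    rw [List.drop_zero] at this
    rw [this]

-- ===== VERDICT (by name: the statement is the Claim_ definition above) =====
theorem split_text_preserving_words_py_spec : Claim_equal_split_text_preserving_words_py := by
  intro text max_length _ hpre
  exact pv_top_eq text max_length hpre
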